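-- pv_equiv track=rewrite | github.com/HLAPSE/RSSIn | app/resources/recommendation.py | get_feed_user
-- ===== SOURCE A (Python) =====
-- def get_feed_user(user_feed, item):
--     feed_user = {}
--     for feed_id in item:
--         for (user_id, feeds) in user_feed.items():
--             if feed_id in feeds:
--                 if feed_id in feed_user:
--                     feed_user[feed_id].append(user_id)
--                 else:
--                     feed_user[feed_id] = [user_id]
--     return feed_user
-- ===== SOURCE B (Python) =====
-- def get_feed_user(user_feed, item):
--     # Inverted index: one pass over every user's feed list, then one pass over item.
--     inv = {}
--     for user_id, feeds in user_feed.items():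
--         for f in set(feeds):
--             inv.setdefault(f, []).append(user_id)
--     feed_user = {}
--     for f in item:
--         if f in inv:
--             feed_user.setdefault(f, []).extend(inv[f])
--     return feed_user
-- ===== Notes on version B (the rewrite author's own statement) =====
-- stated objective: faster
-- what changed: Replaces the per-item scan of every user's whole feed list by an inverted index (feed_id -> users) built in one pass, then a single lookup per item element.
import Mathlib
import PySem

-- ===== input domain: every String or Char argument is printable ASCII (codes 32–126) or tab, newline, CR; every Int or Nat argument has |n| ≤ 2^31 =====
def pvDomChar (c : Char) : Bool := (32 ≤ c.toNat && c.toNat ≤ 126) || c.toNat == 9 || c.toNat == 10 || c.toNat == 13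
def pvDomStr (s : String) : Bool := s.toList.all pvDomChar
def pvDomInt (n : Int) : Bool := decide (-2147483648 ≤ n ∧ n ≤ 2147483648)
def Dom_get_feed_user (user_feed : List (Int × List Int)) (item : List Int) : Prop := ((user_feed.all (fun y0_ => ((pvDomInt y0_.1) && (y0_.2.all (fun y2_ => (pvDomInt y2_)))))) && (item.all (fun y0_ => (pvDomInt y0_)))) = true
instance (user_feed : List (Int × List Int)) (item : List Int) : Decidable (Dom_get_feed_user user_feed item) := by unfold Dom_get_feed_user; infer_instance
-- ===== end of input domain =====

-- B replaces A's per-item scan of every user's whole feed list by an inverted index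
-- (feed_id -> users) built in one pass, then one lookup per item element (objective: faster).


-- ===== PORT A =====
def get_feed_user (user_feed : List (Int × List Int)) (item : List Int) : List (Int × List Int) :=
  (item.foldl (fun feed_user feed_id =>
      user_feed.foldl (fun feed_user p =>
        if p.2.contains feed_id then
          if feed_user.contains feed_id then
            feed_user.modify feed_id [] (fun v => v ++ [p.1])
          else
            feed_user.insert feed_id [p.1]
        else feed_user) feed_user)
    PySem.Dict.empty).items

-- ===== PORT B =====
def get_feed_user_alt (user_feed : List (Int × List Int)) (item : List Int) : List (Int × List Int) :=
  let inv : PySem.Dict Int (List Int) :=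
    user_feed.foldl (fun inv p =>
      (PySem.Set.ofList p.2).foldl (fun inv f => inv.modify f [] (fun v => v ++ [p.1])) inv)
      PySem.Dict.empty
  (item.foldl (fun feed_user f =>
      match inv.get? f with
      | some us => feed_user.modify f [] (fun v => v ++ us)
      | none => feed_user)
    PySem.Dict.empty).items

-- ===== PRECONDITION & SPEC =====
def Spec_get_feed_user (user_feed : List (Int × List Int)) (item : List Int) (out : List (Int × List Int)) : Prop := out = get_feed_user_alt user_feed item
instance (user_feed : List (Int × List Int)) (item : List Int) (out : List (Int × List Int)) : Decidable (Spec_get_feed_user user_feed item out) := by unfold Spec_get_feed_user; infer_instance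

-- ===== CLAIM (what is proved, stated in full; the proofs are below) =====
def Claim_equal_get_feed_user : Prop := ∀ (user_feed : List (Int × List Int)) (item : List Int), Dom_get_feed_user user_feed item → Spec_get_feed_user user_feed item (get_feed_user user_feed item)

-- ===== LEMMAS AND PROOFS =====

-- the users (in user_feed order) whose feed list contains f
def pvU (l : List (Int × List Int)) (f : Int) : List Int :=
  (l.filter (fun p => p.2.contains f)).map Prod.fst

theorem pv_modify_not_contains {κ ν : Type} [BEq κ] (d : PySem.Dict κ ν) (k : κ) (d0 : ν)
    (g : ν → ν) (h : d.contains k = false) : d.modify k d0 g = d.insert k (g d0) := by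
  simp [PySem.Dict.modify, PySem.Dict.getD_of_not_contains d d0 h]

theorem pv_modify_modify {κ ν : Type} [BEq κ] [LawfulBEq κ] (d : PySem.Dict κ ν) (k : κ)
    (d0 : ν) (f g : ν → ν) :
    (d.modify k d0 f).modify k d0 g = d.modify k d0 (fun v => g (f v)) := by
  simp [PySem.Dict.modify, PySem.Dict.getD_insert_self, PySem.Dict.insert_insert_self]

theorem pv_get?_modify_of_ne {κ ν : Type} [BEq κ] [LawfulBEq κ] (d : PySem.Dict κ ν)
    (k k' : κ) (d0 : ν) (f : ν → ν) (h : k' ≠ k) :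
    (d.modify k d0 f).get? k' = d.get? k' := by
  simp [PySem.Dict.modify, PySem.Dict.get?_insert_of_ne d _ h]

-- A's inner loop over user_feed extends the entry at feed_id by all matching users at once.
theorem pvA_inner (l : List (Int × List Int)) (f : Int) (d : PySem.Dict Int (List Int)) :
    l.foldl (fun feed_user p =>
        if p.2.contains f then
          if feed_user.contains f then feed_user.modify f [] (fun v => v ++ [p.1])
          else feed_user.insert f [p.1]
        else feed_user) d
    = if pvU l f = [] then d else d.modify f [] (fun v => v ++ pvU l f) := by
  induction l generalizing d with
  | nil => simp [pvU]
  | cons p l ih =>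
    by_cases hc : p.2.contains f
    · have hm : f ∈ p.2 := by simpa using hc
      have hU : pvU (p :: l) f = p.1 :: pvU l f := by simp [pvU, hm]
      have hstep : (if d.contains f then d.modify f [] (fun v => v ++ [p.1])
          else d.insert f [p.1]) = d.modify f [] (fun v => v ++ [p.1]) := by
        by_cases h : d.contains f
        · simp [h]
        · simp only [Bool.not_eq_true] at h
          simp [h, pv_modify_not_contains d f [] _ h]
      simp only [List.foldl_cons, hc, if_true, hstep, ih, hU]
      by_cases h0 : pvU l f = []
      · simp [h0]
      · rw [if_neg h0]
        simp only [reduceCtorEq, if_false]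
        rw [pv_modify_modify]
        congr 1
        funext v
        simp
    · have hm : f ∉ p.2 := by simpa using hc
      have hU : pvU (p :: l) f = pvU l f := by simp [pvU, hm]
      simp only [List.foldl_cons, hc, if_false, Bool.false_eq_true, hU]
      exact ih d

-- a fold of per-key appends leaves absent keys untouched
theorem pvB_inner_absent (S : List Int) (u : Int) (inv : PySem.Dict Int (List Int)) (f : Int)
    (h : f ∉ S) :
    (S.foldl (fun inv g => inv.modify g [] (fun v => v ++ [u])) inv).get? f = inv.get? f := by
  induction S generalizing inv with
  | nil => rfl
  | cons g S ih =>
    simp only [List.mem_cons, not_or] at h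
    rw [List.foldl_cons, ih (inv.modify g [] (fun v => v ++ [u])) h.2,
      pv_get?_modify_of_ne _ _ _ _ _ h.1]

-- B's inner loop over one (deduplicated) feed list, seen through get?
theorem pvB_inner (S : List Int) (hS : S.Nodup) (u : Int) (inv : PySem.Dict Int (List Int))
    (f : Int) :
    (S.foldl (fun inv g => inv.modify g [] (fun v => v ++ [u])) inv).get? f
    = if f ∈ S then some (inv.getD f [] ++ [u]) else inv.get? f := by
  induction S generalizing inv with
  | nil => simp
  | cons g S ih =>
    rw [List.nodup_cons] at hS
    by_cases hf : f = g
    · subst hf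
      rw [List.foldl_cons, pvB_inner_absent S u _ f hS.1]
      simp [PySem.Dict.modify, PySem.Dict.get?_insert_self]
    · rw [List.foldl_cons, ih hS.2]
      have hg : (inv.modify g [] (fun v => v ++ [u])).get? f = inv.get? f :=
        pv_get?_modify_of_ne _ _ _ _ _ hf
      have hgD : (inv.modify g [] (fun v => v ++ [u])).getD f [] = inv.getD f [] := by
        rw [PySem.Dict.getD_eq_get?_getD, hg, ← PySem.Dict.getD_eq_get?_getD]
      simp [hf, hg, hgD]

-- the inverted index looks up exactly the list of matching users
theorem pvB_index (l : List (Int × List Int)) (inv : PySem.Dict Int (List Int)) (f : Int) :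
    (l.foldl (fun inv p =>
        (PySem.Set.ofList p.2).foldl (fun inv g => inv.modify g [] (fun v => v ++ [p.1])) inv)
      inv).get? f
    = match pvU l f with
      | [] => inv.get? f
      | us => some (inv.getD f [] ++ us) := by
  induction l generalizing inv with
  | nil => simp [pvU]
  | cons p l ih =>
    rw [List.foldl_cons, ih]
    have hmem : f ∈ PySem.Set.ofList p.2 ↔ p.2.contains f = true := by
      simp [PySem.Set.mem_ofList]
    have hin := pvB_inner (PySem.Set.ofList p.2) (PySem.Set.nodup_ofList p.2) p.1 inv f
    by_cases hc : p.2.contains f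
    · have hm2 : f ∈ p.2 := by simpa using hc
      have hU : pvU (p :: l) f = p.1 :: pvU l f := by simp [pvU, hm2]
      rw [hmem.symm] at hc
      rw [if_pos hc] at hin
      have hgD : ((PySem.Set.ofList p.2).foldl
            (fun inv g => inv.modify g [] (fun v => v ++ [p.1])) inv).getD f []
          = inv.getD f [] ++ [p.1] := by
        rw [PySem.Dict.getD_eq_get?_getD, hin]; rfl
      rw [hU]
      cases h0 : pvU l f with
      | nil => simp [hin]
      | cons a us => simp [hgD]
    · have hm2 : f ∉ p.2 := by simpa using hc
      have hU : pvU (p :: l) f = pvU l f := by simp [pvU, hm2]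
      have hc2 : f ∉ PySem.Set.ofList p.2 := fun h => hc (hmem.mp h)
      rw [if_neg hc2] at hin
      have hgD : ((PySem.Set.ofList p.2).foldl
            (fun inv g => inv.modify g [] (fun v => v ++ [p.1])) inv).getD f []
          = inv.getD f [] := by
        rw [PySem.Dict.getD_eq_get?_getD, hin, ← PySem.Dict.getD_eq_get?_getD]
      rw [hU, hin, hgD]

-- ===== VERDICT (by name: the statement is the Claim_ definition above) =====
theorem get_feed_user_spec : Claim_equal_get_feed_user := by
  intro user_feed item _
  unfold Spec_get_feed_user
  simp only [get_feed_user, get_feed_user_alt]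
  congr 1
  congr 1
  funext d f
  rw [pvA_inner, pvB_index user_feed PySem.Dict.empty f]
  cases h0 : pvU user_feed f with
  | nil => simp
  | cons a us => simp [PySem.Dict.getD_empty]
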